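-- pv_equiv track=rewrite | github.com/guoit/leetcode-python | code1563StoneGameV.py | stoneGameV
-- ===== SOURCE A (Python) =====
-- from typing import List
--
-- from functools import lru_cache
--
-- def stoneGameV(stoneValue: List[int]) -> int:
--     A = [0]
--     for num in stoneValue:
--         A.append(A[-1] + num)
--     @lru_cache(None)
--     def helper(i, j):
--         if i >= j: return 0
--         res = 0
--         for k in range(i, j):
--             # left is i to k, right is k+1 to j
--             left, right = A[k+1] - A[i], A[j+1] - A[k+1]
--             if left > right:
--                 res = max(res, right + helper(k+1, j))
--             elif left < right:
--                 res = max(res, left + helper(i, k))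
--             else:
--                 res = max(res, left + helper(i, k), right + helper(k+1, j))
--         return res
--     return helper(0, len(stoneValue)-1)
-- ===== SOURCE B (Python) =====
-- from itertools import accumulate
--
-- def stoneGameV(stoneValue):
--     # Bottom-up interval DP over increasing interval lengths, dict-backed table.
--     n = len(stoneValue)
--     pre = [0] + list(accumulate(stoneValue))
--     dp = {}
--     for length in range(2, n + 1):
--         for i in range(0, n - length + 1):
--             j = i + length - 1
--             best = 0
--             for k in range(i, j):
--                 left = pre[k + 1] - pre[i]
--                 right = pre[j + 1] - pre[k + 1]
--                 if left < right:
--                     cand = left + dp.get((i, k), 0)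
--                 elif left > right:
--                     cand = right + dp.get((k + 1, j), 0)
--                 else:
--                     cand = left + max(dp.get((i, k), 0), dp.get((k + 1, j), 0))
--                 if cand > best:
--                     best = cand
--             dp[(i, j)] = best
--     return dp.get((0, n - 1), 0)
-- ===== Notes on version B (the rewrite author's own statement) =====
-- stated objective: alternative
-- what changed: Replaces the top-down lru_cache recursion (which only evaluates reachable subintervals) by an explicit bottom-up interval DP that tabulates every interval by increasing length in a dict, with the candidate written as min-side value plus the matching subresult.
import Mathlib
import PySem

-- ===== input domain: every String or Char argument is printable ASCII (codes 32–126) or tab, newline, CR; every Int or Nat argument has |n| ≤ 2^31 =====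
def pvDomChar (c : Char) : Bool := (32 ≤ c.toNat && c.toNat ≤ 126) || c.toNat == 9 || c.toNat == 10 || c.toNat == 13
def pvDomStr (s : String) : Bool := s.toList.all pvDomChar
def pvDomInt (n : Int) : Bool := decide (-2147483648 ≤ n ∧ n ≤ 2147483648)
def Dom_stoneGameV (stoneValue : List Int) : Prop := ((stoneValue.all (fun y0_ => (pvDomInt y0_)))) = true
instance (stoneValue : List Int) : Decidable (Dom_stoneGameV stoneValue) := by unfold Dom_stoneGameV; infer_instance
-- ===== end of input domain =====

-- B replaces A's top-down lru_cache recursion by an explicit bottom-up interval DP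
-- tabulated by increasing interval length (objective: alternative structure, same O(n^3) cost).

-- ===== PORT A =====
-- list indexing xs[i]; every index used by either program is provably in range
def pvGetI (xs : List Int) (i : Int) : Int := PySem.List.pyGetD xs i 0

-- A = [0]; for num in stoneValue: A.append(A[-1] + num)
def pvPrefixA (stoneValue : List Int) : List Int :=
  stoneValue.foldl (fun A num => A ++ [pvGetI A (-1) + num]) [0]

-- helper(i, j) of A; fuel is only a termination device (j - i decreases on every call,
-- so fuel = len(stoneValue) is always sufficient for the top-level call)
def pvHelperA (A : List Int) (fuel : Nat) (i j : Int) : Int :=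
  if i ≥ j then 0
  else
    match fuel with
    | 0 => 0
    | f + 1 =>
      (PySem.List.pyRange i j 1).foldl (fun res k =>
        let left := pvGetI A (k + 1) - pvGetI A i
        let right := pvGetI A (j + 1) - pvGetI A (k + 1)
        if left > right then max res (right + pvHelperA A f (k + 1) j)
        else if left < right then max res (left + pvHelperA A f i k)
        else max (max res (left + pvHelperA A f i k)) (right + pvHelperA A f (k + 1) j)) 0

def stoneGameV (stoneValue : List Int) : Int :=
  pvHelperA (pvPrefixA stoneValue) stoneValue.length 0 ((stoneValue.length : Int) - 1)

-- ===== PORT B =====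
-- the inner 'for k in range(i, j)' loop of Source B computing 'best'
def pvInnerB (pre : List Int) (dp : PySem.Dict (Int × Int) Int) (i j : Int) : Int :=
  (PySem.List.pyRange i j 1).foldl (fun best k =>
    let left := pvGetI pre (k + 1) - pvGetI pre i
    let right := pvGetI pre (j + 1) - pvGetI pre (k + 1)
    let cand :=
      if left < right then left + dp.getD (i, k) 0
      else if left > right then right + dp.getD (k + 1, j) 0
      else left + max (dp.getD (i, k) 0) (dp.getD (k + 1, j) 0)
    if cand > best then cand else best) 0

def stoneGameV_alt (stoneValue : List Int) : Int :=
  let n : Int := stoneValue.length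
  -- pre = [0] + list(accumulate(stoneValue))
  let pre : List Int := stoneValue.scanl (· + ·) 0
  let dp :=
    (PySem.List.pyRange 2 (n + 1) 1).foldl (fun dp length =>
      (PySem.List.pyRange 0 (n - length + 1) 1).foldl (fun dp i =>
        let j := i + length - 1
        dp.insert (i, j) (pvInnerB pre dp i j)) dp)
      PySem.Dict.empty
  dp.getD (0, n - 1) 0

-- ===== PRECONDITION & SPEC =====
def Spec_stoneGameV (stoneValue : List Int) (out : Int) : Prop := out = stoneGameV_alt stoneValue
instance (stoneValue : List Int) (out : Int) : Decidable (Spec_stoneGameV stoneValue out) := by unfold Spec_stoneGameV; infer_instance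

-- ===== CLAIM (what is proved, stated in full; the proofs are below) =====
def Claim_equal_stoneGameV : Prop := ∀ (stoneValue : List Int), Dom_stoneGameV stoneValue → Spec_stoneGameV stoneValue (stoneGameV stoneValue)

-- ===== LEMMAS AND PROOFS =====

-- A's prefix-sum list equals scanl (+) 0
theorem pvHelperA_ge (A : List Int) (f : Nat) (i j : Int) (h : i ≥ j) : pvHelperA A f i j = 0 := by
  cases f <;> simp [pvHelperA, h]

theorem pvPrefix_aux (sv : List Int) : ∀ (ys : List Int) (a : Int),
    sv.foldl (fun A num => A ++ [pvGetI A (-1) + num]) (ys ++ [a]) = ys ++ List.scanl (· + ·) a sv := by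
  induction sv with
  | nil => intro ys a; simp [List.scanl]
  | cons x sv ih =>
    intro ys a
    have hg : pvGetI (ys ++ [a]) (-1) = a := by
      simp [pvGetI, PySem.List.pyGetD_neg_one_append_singleton]
    simp only [List.foldl_cons, List.scanl, hg]
    have := ih (ys ++ [a]) (a + x)
    simpa [List.append_assoc] using this

theorem pvPrefix_eq (sv : List Int) : pvPrefixA sv = List.scanl (· + ·) 0 sv := by
  have := pvPrefix_aux sv [] 0
  simpa [pvPrefixA] using this

-- fuel-stability of A's helper
theorem pvHelperA_fuel (A : List Int) : ∀ (f1 f2 : Nat) (i j : Int),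
    j - i ≤ (f1 : Int) → j - i ≤ (f2 : Int) → pvHelperA A f1 i j = pvHelperA A f2 i j := by
  intro f1
  induction f1 with
  | zero =>
    intro f2 i j h1 _
    have hij : i ≥ j := by omega
    rw [pvHelperA_ge A 0 i j hij, pvHelperA_ge A f2 i j hij]
  | succ f ih =>
    intro f2 i j h1 h2
    by_cases hij : i ≥ j
    · rw [pvHelperA_ge A _ i j hij, pvHelperA_ge A f2 i j hij]
    · have hlt : i < j := by omega
      obtain ⟨f2', rfl⟩ : ∃ f2', f2 = f2' + 1 := by
        cases f2 with
        | zero => exfalso; omega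
        | succ m => exact ⟨m, rfl⟩
      rw [pvHelperA, pvHelperA, if_neg hij, if_neg hij]
      apply PySem.List.foldl_congr_mem
      intro res k hk
      rw [PySem.List.mem_pyRange_one] at hk
      have e1 : pvHelperA A f (k + 1) j = pvHelperA A f2' (k + 1) j := ih f2' (k+1) j (by omega) (by omega)
      have e2 : pvHelperA A f i k = pvHelperA A f2' i k := ih f2' i k (by omega) (by omega)
      simp only [e1, e2]

-- canonical (fuel-free) value of A's helper
def pvH (A : List Int) (i j : Int) : Int := pvHelperA A (j - i).toNat i j

theorem pvH_eq_fuel (A : List Int) (f : Nat) (i j : Int) (h : j - i ≤ (f : Int)) :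
    pvHelperA A f i j = pvH A i j :=
  pvHelperA_fuel A f (j - i).toNat i j h (Int.self_le_toNat _)

theorem pvH_ge (A : List Int) {i j : Int} (h : i ≥ j) : pvH A i j = 0 :=
  pvHelperA_ge A _ i j h

theorem pvH_lt (A : List Int) {i j : Int} (h : i < j) :
    pvH A i j = (PySem.List.pyRange i j 1).foldl (fun res k =>
      let left := pvGetI A (k + 1) - pvGetI A i
      let right := pvGetI A (j + 1) - pvGetI A (k + 1)
      if left > right then max res (right + pvH A (k + 1) j)
      else if left < right then max res (left + pvH A i k)
      else max (max res (left + pvH A i k)) (right + pvH A (k + 1) j)) 0 := by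
  have hij : ¬ i ≥ j := by omega
  obtain ⟨t, ht⟩ : ∃ t, (j - i).toNat = t + 1 := by
    have : 0 < (j - i).toNat := by omega
    exact ⟨(j - i).toNat - 1, by omega⟩
  rw [pvH, ht, pvHelperA, if_neg hij]
  apply PySem.List.foldl_congr_mem
  intro res k hk
  rw [PySem.List.mem_pyRange_one] at hk
  have e1 : pvHelperA A t (k + 1) j = pvH A (k + 1) j := pvH_eq_fuel A t (k+1) j (by omega)
  have e2 : pvHelperA A t i k = pvH A i k := pvH_eq_fuel A t i k (by omega)
  simp only [e1, e2]

-- table invariant: dp holds the right value for every interval of length ≤ L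
def pvInv (pre : List Int) (n : Int) (dp : PySem.Dict (Int × Int) Int) (L : Int) : Prop :=
  ∀ i j : Int, 0 ≤ i → i ≤ j → j < n → j - i + 1 ≤ L → dp.getD (i, j) 0 = pvH pre i j

theorem pvInnerB_eq (pre : List Int) (n : Int) (dp : PySem.Dict (Int × Int) Int) (i j : Int)
    (hInv : pvInv pre n dp (j - i)) (h0 : 0 ≤ i) (hij : i ≤ j) (hj : j < n) :
    pvInnerB pre dp i j = pvH pre i j := by
  rcases lt_or_eq_of_le hij with hlt | rfl
  · rw [pvH_lt pre hlt, pvInnerB]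
    apply PySem.List.foldl_congr_mem
    intro best k hk
    rw [PySem.List.mem_pyRange_one] at hk
    have dik : dp.getD (i, k) 0 = pvH pre i k := hInv i k h0 (by omega) (by omega) (by omega)
    have dkj : dp.getD (k + 1, j) 0 = pvH pre (k + 1) j := hInv (k+1) j (by omega) (by omega) (by omega) (by omega)
    simp only [dik, dkj]
    by_cases h1 : pvGetI pre (k + 1) - pvGetI pre i > pvGetI pre (j + 1) - pvGetI pre (k + 1)
    · simp only [if_pos h1, if_neg (by omega : ¬ pvGetI pre (k + 1) - pvGetI pre i < pvGetI pre (j + 1) - pvGetI pre (k + 1))]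
      split <;> omega
    · by_cases h2 : pvGetI pre (k + 1) - pvGetI pre i < pvGetI pre (j + 1) - pvGetI pre (k + 1)
      · simp only [if_neg h1, if_pos h2]
        split <;> omega
      · simp only [if_neg h1, if_neg h2]
        split <;> omega
  · rw [pvH_ge pre (le_refl i), pvInnerB, PySem.List.pyRange_one_eq_nil (le_refl i), List.foldl_nil]

-- invariant through the inner 'for i' loop of length L
theorem pvInnerLoop (pre : List Int) (n L : Int) (hL2 : 2 ≤ L) (_hLn : L ≤ n) :
    ∀ (t : Nat) (a : Int) (dp : PySem.Dict (Int × Int) Int) (b : Int),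
      (b - a).toNat = t → 0 ≤ a → a ≤ b → b ≤ n - L + 1 →
      pvInv pre n dp (L - 1) →
      (∀ i : Int, 0 ≤ i → i < a → dp.getD (i, i + L - 1) 0 = pvH pre i (i + L - 1)) →
      (pvInv pre n ((PySem.List.pyRange a b 1).foldl (fun dp i =>
          dp.insert (i, i + L - 1) (pvInnerB pre dp i (i + L - 1))) dp) (L - 1) ∧
       ∀ i : Int, 0 ≤ i → i < b →
         ((PySem.List.pyRange a b 1).foldl (fun dp i =>
          dp.insert (i, i + L - 1) (pvInnerB pre dp i (i + L - 1))) dp).getD (i, i + L - 1) 0 = pvH pre i (i + L - 1)) := by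
  intro t
  induction t with
  | zero =>
    intro a dp b ht h0 hab hb hInv hdone
    have : a = b := by omega
    subst this
    rw [PySem.List.pyRange_one_eq_nil (le_refl a), List.foldl_nil]
    exact ⟨hInv, hdone⟩
  | succ t ih =>
    intro a dp b ht h0 hab hb hInv hdone
    have hlt : a < b := by omega
    rw [PySem.List.pyRange_one_cons hlt, List.foldl_cons]
    have hval : pvInnerB pre dp a (a + L - 1) = pvH pre a (a + L - 1) := by
      apply pvInnerB_eq pre n dp a (a + L - 1) _ h0 (by omega) (by omega)
      intro i' j' h0' hij' hj' hlen'
      exact hInv i' j' h0' hij' hj' (by omega)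
    set dp' := dp.insert (a, a + L - 1) (pvInnerB pre dp a (a + L - 1)) with hdp'
    have hInv' : pvInv pre n dp' (L - 1) := by
      intro i' j' h0' hij' hj' hlen'
      have hne : (i', j') ≠ (a, a + L - 1) := by
        intro h; injection h with e1 e2; omega
      rw [hdp', PySem.Dict.getD_insert, if_neg hne]
      exact hInv i' j' h0' hij' hj' hlen'
    have hdone' : ∀ i : Int, 0 ≤ i → i < a + 1 → dp'.getD (i, i + L - 1) 0 = pvH pre i (i + L - 1) := by
      intro i hi0 hia
      rcases lt_or_eq_of_le (by omega : i ≤ a) with h | rfl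
      · have hne : (i, i + L - 1) ≠ (a, a + L - 1) := by
          intro hgood; injection hgood with e1 e2; omega
        rw [hdp', PySem.Dict.getD_insert, if_neg hne]
        exact hdone i hi0 h
      · rw [hdp', PySem.Dict.getD_insert, if_pos rfl, hval]
    exact ih (a + 1) dp' b (by omega) (by omega) (by omega) hb hInv' hdone'

-- invariant through the outer 'for length' loop
theorem pvOuterLoop (pre : List Int) (n : Int) :
    ∀ (t : Nat) (L : Int) (dp : PySem.Dict (Int × Int) Int),
      ((n + 1) - L).toNat = t → 2 ≤ L → L ≤ n + 1 →
      pvInv pre n dp (L - 1) →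
      pvInv pre n ((PySem.List.pyRange L (n + 1) 1).foldl (fun dp length =>
        (PySem.List.pyRange 0 (n - length + 1) 1).foldl (fun dp i =>
          dp.insert (i, i + length - 1) (pvInnerB pre dp i (i + length - 1))) dp) dp) n := by
  intro t
  induction t with
  | zero =>
    intro L dp ht hL2 hLn hInv
    have : L = n + 1 := by omega
    subst this
    rw [PySem.List.pyRange_one_eq_nil (le_refl (n + 1)), List.foldl_nil]
    intro i j h0 hij hj hlen
    exact hInv i j h0 hij hj (by omega)
  | succ t ih =>
    intro L dp ht hL2 hLn hInv
    have hlt : L < n + 1 := by omega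
    rw [PySem.List.pyRange_one_cons hlt, List.foldl_cons]
    obtain ⟨hInv1, hnew⟩ := pvInnerLoop pre n L hL2 (by omega) (n - L + 1).toNat 0
      dp (n - L + 1) (by omega) (le_refl 0) (by omega) (le_refl _) hInv (by intro i _ h; omega)
    set dp' := (PySem.List.pyRange 0 (n - L + 1) 1).foldl (fun dp i =>
      dp.insert (i, i + L - 1) (pvInnerB pre dp i (i + L - 1))) dp with hdp'
    have hInvL : pvInv pre n dp' L := by
      intro i j h0 hij hj hlen
      rcases lt_or_eq_of_le hlen with h | h
      · exact hInv1 i j h0 hij hj (by omega)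
      · have hj' : j = i + L - 1 := by omega
        subst hj'
        exact hnew i h0 (by omega)
    exact ih (L + 1) dp' (by omega) (by omega) (by omega) (by simpa using hInvL)

-- (if c > b then c else b) over Int is max; used implicitly via omega above

-- ===== VERDICT (by name: the statement is the Claim_ definition above) =====
theorem stoneGameV_spec : Claim_equal_stoneGameV := by
  intro sv _
  unfold Spec_stoneGameV
  show stoneGameV sv = stoneGameV_alt sv
  rcases sv with _ | ⟨x, rest⟩
  · rfl
  · set sv := x :: rest with hsv
    set n : Int := (sv.length : Int) with hn
    have hlen1 : sv.length = rest.length + 1 := by simp [hsv]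
    have hn1 : 1 ≤ n := by rw [hn, hlen1]; push_cast; omega
    set pre : List Int := List.scanl (· + ·) 0 sv with hpre
    have hA : stoneGameV sv = pvH pre 0 (n - 1) := by
      rw [stoneGameV, pvPrefix_eq]
      exact pvH_eq_fuel pre sv.length 0 (n - 1) (by omega)
    have hInv0 : pvInv pre n PySem.Dict.empty 1 := by
      intro i j h0 hij hj hlen
      have : i = j := by omega
      subst this
      rw [PySem.Dict.getD_empty, pvH_ge pre (le_refl i)]
    have hB := pvOuterLoop pre n ((n + 1) - 2).toNat 2 PySem.Dict.empty rfl (le_refl 2)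
      (by omega) (by simpa using hInv0)
    have hBval : stoneGameV_alt sv = pvH pre 0 (n - 1) := by
      rcases lt_or_eq_of_le hn1 with h2 | h1
      · rw [stoneGameV_alt]
        exact hB 0 (n - 1) (le_refl 0) (by omega) (by omega) (by omega)
      · -- n = 1: the outer range is empty and both sides are 0
        rw [stoneGameV_alt]
        simp only [← hn, ← hpre]
        rw [show n + 1 = 2 by omega, PySem.List.pyRange_one_eq_nil (le_refl 2), List.foldl_nil,
          PySem.Dict.getD_empty, pvH_ge pre (by omega : 0 ≥ n - 1)]
    rw [hA, hBval]
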